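-- pv_equiv track=rewrite | github.com/fabbo-repo/UPV | etsinf3/SAR/Practicas/pract0/Ejercicio3Alt.py | anagramaPerfecto
-- ===== SOURCE A (Python) =====
-- def anagramaPerfecto(cadena1,cadena2):
--     c1 = cadena1.lower()
--     c2 = cadena2.lower()
--     for i in c1:
--         if not i.isalpha():
--             c1 = c1.replace(i,"")
--     for i in c2:
--         if not i.isalpha():
--             c2 = c2.replace(i,"")
--
--     for c in c1:
--         if(c1.count(c) != c2.count(c)):
--             return False
--         c1 = c1.replace(c,"")
--         c2 = c2.replace(c,"")
--     return c1==c2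
-- ===== SOURCE B (Python) =====
-- def anagramaPerfecto(cadena1, cadena2):
--     n1 = ''.join(ch for ch in cadena1.lower() if ch.isalpha())
--     n2 = ''.join(ch for ch in cadena2.lower() if ch.isalpha())
--     return sorted(n1) == sorted(n2)
-- ===== Notes on version B (the rewrite author's own statement) =====
-- stated objective: simpler
-- what changed: Replaces A's repeated scan-and-remove loops (quadratic count/replace passes) by normalizing each string once with a filter comprehension and comparing the two sorted character lists.
import Mathlib
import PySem

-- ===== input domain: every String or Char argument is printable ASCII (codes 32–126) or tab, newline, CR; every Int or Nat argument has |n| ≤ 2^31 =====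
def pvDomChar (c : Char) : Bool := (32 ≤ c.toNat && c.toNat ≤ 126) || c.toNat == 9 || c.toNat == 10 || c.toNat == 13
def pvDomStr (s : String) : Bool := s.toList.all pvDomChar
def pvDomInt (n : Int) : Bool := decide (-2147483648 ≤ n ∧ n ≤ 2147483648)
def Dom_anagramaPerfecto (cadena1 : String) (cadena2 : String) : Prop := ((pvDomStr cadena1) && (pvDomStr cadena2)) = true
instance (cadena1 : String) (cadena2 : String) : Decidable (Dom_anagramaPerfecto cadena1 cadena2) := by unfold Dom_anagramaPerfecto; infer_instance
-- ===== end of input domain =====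

-- B replaces A's repeated count-and-remove scans by normalizing each string once and comparing
-- the two sorted character lists (objective: simpler).

-- ===== PORT A =====
-- s.replace(i, "") for a ONE-CHARACTER string i removes every occurrence of that character: exact.
def pvRemoveChar (s : List Char) (i : Char) : List Char := s.filter (fun x => x != i)

-- 'for i in c1: if not i.isalpha(): c1 = c1.replace(i, "")' — iterates the snapshot, mutates the state.
def pvNormLoop (snapshot : List Char) (state : List Char) : List Char :=
  snapshot.foldl (fun s i => if !(PySem.Chars.isalpha i) then pvRemoveChar s i else s) state

-- 'for c in c1: if c1.count(c) != c2.count(c): return False; c1 = c1.replace(c,""); c2 = c2.replace(c,"")'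
-- followed by 'return c1 == c2'; s.count(c) for a one-character c is the character count: exact.
def pvCountLoop : List Char → List Char → List Char → Bool
  | [], c1, c2 => c1 == c2
  | c :: rest, c1, c2 =>
      if c1.count c != c2.count c then false
      else pvCountLoop rest (pvRemoveChar c1 c) (pvRemoveChar c2 c)

def anagramaPerfecto (cadena1 : String) (cadena2 : String) : Bool :=
  let c1 := PySem.Chars.lower cadena1.toList
  let c2 := PySem.Chars.lower cadena2.toList
  let c1 := pvNormLoop c1 c1
  let c2 := pvNormLoop c2 c2
  pvCountLoop c1 c1 c2

-- ===== PORT B =====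
-- ''.join(ch for ch in cadena.lower() if ch.isalpha())
def pvNormalize (cadena : String) : List Char :=
  (PySem.Chars.lower cadena.toList).filter PySem.Chars.isalpha

def anagramaPerfecto_alt (cadena1 : String) (cadena2 : String) : Bool :=
  let n1 := pvNormalize cadena1
  let n2 := pvNormalize cadena2
  PySem.List.sorted n1 (fun x => x) false == PySem.List.sorted n2 (fun x => x) false

-- ===== PRECONDITION & SPEC =====
def Spec_anagramaPerfecto (cadena1 : String) (cadena2 : String) (out : Bool) : Prop := out = anagramaPerfecto_alt cadena1 cadena2
instance (cadena1 : String) (cadena2 : String) (out : Bool) : Decidable (Spec_anagramaPerfecto cadena1 cadena2 out) := by unfold Spec_anagramaPerfecto; infer_instance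

-- ===== CLAIM (what is proved, stated in full; the proofs are below) =====
def Claim_equal_anagramaPerfecto : Prop := ∀ (cadena1 : String) (cadena2 : String), Dom_anagramaPerfecto cadena1 cadena2 → Spec_anagramaPerfecto cadena1 cadena2 (anagramaPerfecto cadena1 cadena2)

-- ===== LEMMAS AND PROOFS =====

-- The normalization fold removes from the state every non-alphabetic character occurring in the snapshot.
theorem pvNormLoop_eq (l : List Char) : ∀ s : List Char,
    pvNormLoop l s = s.filter (fun c => PySem.Chars.isalpha c || !(l.contains c)) := by
  induction l with
  | nil => intro s; simp [pvNormLoop]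
  | cons i rest ih =>
      intro s
      simp only [pvNormLoop, List.foldl_cons]
      by_cases hi : PySem.Chars.isalpha i = true
      · rw [hi]
        simp only [Bool.not_true, Bool.false_eq_true, if_false]
        rw [show (rest.foldl (fun s i => if !(PySem.Chars.isalpha i) then pvRemoveChar s i else s) s) = pvNormLoop rest s from rfl, ih]
        apply List.filter_congr
        intro c _
        by_cases hc : PySem.Chars.isalpha c = true
        · simp [hc]
        · have : c ≠ i := fun h => hc (h ▸ hi)
          simp [hc, this]
      · rw [Bool.not_eq_true] at hi
        rw [hi]
        simp only [Bool.not_false, if_true]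
        rw [show (rest.foldl (fun s i => if !(PySem.Chars.isalpha i) then pvRemoveChar s i else s) (pvRemoveChar s i)) = pvNormLoop rest (pvRemoveChar s i) from rfl, ih]
        rw [pvRemoveChar, List.filter_filter]
        apply List.filter_congr
        intro c _
        by_cases hci : c = i
        · subst hci; simp [hi]
        · simp [hci]

-- Applied to its own snapshot, the normalization is exactly the isalpha filter.
theorem pvNormLoop_self (s : List Char) :
    pvNormLoop s s = s.filter PySem.Chars.isalpha := by
  rw [pvNormLoop_eq]
  apply List.filter_congr
  intro c hc
  cases ha : PySem.Chars.isalpha c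
  · simpa using hc
  · simp

-- Counting in a list with one character removed.
theorem pvCount_removeChar (l : List Char) (c a : Char) :
    (pvRemoveChar l c).count a = if a = c then 0 else l.count a := by
  unfold pvRemoveChar
  split_ifs with ha
  · subst ha
    simp [List.count_eq_zero, List.mem_filter]
  · rw [List.count_filter]
    simp [ha]

-- The count-and-remove loop decides permutation, provided every element of c1 occurs in the snapshot.
theorem pvCountLoop_eq_perm : ∀ (cs c1 c2 : List Char), (∀ x ∈ c1, x ∈ cs) →
    pvCountLoop cs c1 c2 = decide (c1.Perm c2) := by
  intro cs
  induction cs with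
  | nil =>
      intro c1 c2 hsub
      have h1 : c1 = [] := List.eq_nil_iff_forall_not_mem.mpr (fun x hx => (List.not_mem_nil (hsub x hx)))
      subst h1
      simp only [pvCountLoop, List.nil_perm]
      cases c2 <;> simp
  | cons c rest ih =>
      intro c1 c2 hsub
      simp only [pvCountLoop]
      by_cases hcount : c1.count c = c2.count c
      · have hne : (c1.count c != c2.count c) = false := by simp [hcount]
        rw [hne, if_neg (by simp)]
        rw [ih]
        · congr 1
          simp only [eq_iff_iff, List.perm_iff_count]
          constructor
          · intro h a
            by_cases ha : a = c
            · subst ha; exact hcount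
            · have := h a
              rw [pvCount_removeChar, pvCount_removeChar] at this
              simpa [ha] using this
          · intro h a
            rw [pvCount_removeChar, pvCount_removeChar]
            split_ifs with ha
            · rfl
            · exact h a
        · intro x hx
          rw [pvRemoveChar, List.mem_filter] at hx
          obtain ⟨hx1, hx2⟩ := hx
          have hxc : x ≠ c := by simpa using hx2
          cases hsub x hx1 with
          | head => exact absurd rfl hxc
          | tail _ h => exact h
      · have hne : (c1.count c != c2.count c) = true := by simpa using hcount
        rw [hne, if_pos rfl]
        have : ¬ c1.Perm c2 := fun h => hcount (h.count_eq c)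
        simp [this]

-- ===== VERDICT (by name: the statement is the Claim_ definition above) =====
theorem anagramaPerfecto_spec : Claim_equal_anagramaPerfecto := by
  intro cadena1 cadena2 _
  unfold Spec_anagramaPerfecto anagramaPerfecto anagramaPerfecto_alt pvNormalize
  simp only [pvNormLoop_self]
  set n1 := (PySem.Chars.lower cadena1.toList).filter PySem.Chars.isalpha
  set n2 := (PySem.Chars.lower cadena2.toList).filter PySem.Chars.isalpha
  rw [pvCountLoop_eq_perm n1 n1 n2 (fun x hx => hx)]
  have := PySem.List.sorted_id_eq_sorted_id_iff_perm (xs := n1) (ys := n2)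
  by_cases h : n1.Perm n2
  · simp [h, this.mpr h]
  · have : PySem.List.sorted n1 (fun x => x) false ≠ PySem.List.sorted n2 (fun x => x) false :=
      fun he => h (this.mp he)
    simp [h, this]
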